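-- pv_equiv track=rewrite | github.com/Angelou-cious/python_notes | 5.Python String Exercise/05_count_chars_digits_symbols.py | count
-- ===== SOURCE A (Python) =====
-- def count(str):    # Function that takes a string parameter and counts characters, digits and symbols
--
--     # Initialize counters for tracking different character types
--     chars = 0      # Counter for alphabetic characters
--     digits = 0     # Counter for numeric digits
--     symbols = 0    # Counter for special symbols/characters
--
--     for char in str:           # Iterate through each character in the input string
--         if char.isalpha():     # Check if character is a letter (a-z, A-Z)
--             chars += 1         # Increment character counter
--         elif char.isdigit():   # Check if character is a number (0-9)
--             digits += 1        # Increment digit counter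
--         else:                  # If character is neither letter nor digit
--             symbols += 1       # Increment symbol counter
--     return (chars, digits, symbols)  # Return all three counters as a tuple
-- ===== SOURCE B (Python) =====
-- def count(str):
--     # Simpler decomposition: two counting passes, symbols by arithmetic.
--     chars = sum(1 for c in str if c.isalpha())
--     digits = sum(1 for c in str if c.isdigit())
--     return (chars, digits, len(str) - chars - digits)
-- ===== Notes on version B (the rewrite author's own statement) =====
-- stated objective: simpler
-- what changed: Replaces the single loop with a three-way if/elif/else accumulator by two independent countP-style passes (isalpha, isdigit) and derives the symbol count arithmetically as len - chars - digits, never testing for a symbol.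
import Mathlib
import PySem

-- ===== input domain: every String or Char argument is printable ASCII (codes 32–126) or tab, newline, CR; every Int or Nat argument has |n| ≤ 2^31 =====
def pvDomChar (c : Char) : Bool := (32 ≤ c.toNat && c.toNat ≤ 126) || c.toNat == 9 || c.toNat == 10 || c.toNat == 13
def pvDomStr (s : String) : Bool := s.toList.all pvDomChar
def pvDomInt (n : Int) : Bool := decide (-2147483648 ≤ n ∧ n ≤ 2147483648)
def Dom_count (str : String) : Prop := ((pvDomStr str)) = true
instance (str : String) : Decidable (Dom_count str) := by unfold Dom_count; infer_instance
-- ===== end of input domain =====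

-- B replaces A's single three-branch elif loop by two independent counting passes
-- (isalpha, isdigit) and derives the symbol count as len - chars - digits (simpler decomposition).

-- ===== PORT A =====
def count (str : String) : Int × Int × Int :=
  let st := str.toList.foldl
    (fun (acc : Int × Int × Int) (char : Char) =>
      if PySem.Chars.isalpha char then (acc.1 + 1, acc.2.1, acc.2.2)
      else if PySem.Chars.isdigit char then (acc.1, acc.2.1 + 1, acc.2.2)
      else (acc.1, acc.2.1, acc.2.2 + 1))
    (0, 0, 0)
  st

-- ===== PORT B =====
def count_alt (str : String) : Int × Int × Int :=
  let chars : Int := str.toList.countP (fun c => PySem.Chars.isalpha c)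
  let digits : Int := str.toList.countP (fun c => PySem.Chars.isdigit c)
  (chars, digits, (str.toList.length : Int) - chars - digits)

-- ===== PRECONDITION & SPEC =====
def Spec_count (str : String) (out : Int × Int × Int) : Prop := out = count_alt str
instance (str : String) (out : Int × Int × Int) : Decidable (Spec_count str out) := by unfold Spec_count; infer_instance

-- ===== CLAIM (what is proved, stated in full; the proofs are below) =====
def Claim_equal_count : Prop := ∀ (str : String), Dom_count str → Spec_count str (count str)

-- ===== LEMMAS AND PROOFS =====

-- isalpha and isdigit are mutually exclusive on Char.
theorem alpha_digit_excl (c : Char) :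
    PySem.Chars.isalpha c = true → PySem.Chars.isdigit c = false := by
  simp [PySem.Chars.isalpha, PySem.Chars.isdigit, PySem.Chars.isupper, PySem.Chars.islower,
    Char.le_def]
  intro h h2
  rcases h with h|h <;> revert h h2 <;>
    simp [UInt32.le_iff_toNat_le, UInt32.lt_iff_toNat_lt] <;> omega

-- Loop invariant for A's fold: accumulators plus the counts of the three branches.
theorem count_loop (l : List Char) (a b c : Int) :
    l.foldl
      (fun (acc : Int × Int × Int) (char : Char) =>
        if PySem.Chars.isalpha char then (acc.1 + 1, acc.2.1, acc.2.2)
        else if PySem.Chars.isdigit char then (acc.1, acc.2.1 + 1, acc.2.2)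
        else (acc.1, acc.2.1, acc.2.2 + 1))
      (a, b, c)
    = (a + l.countP (fun ch => PySem.Chars.isalpha ch),
       b + l.countP (fun ch => PySem.Chars.isdigit ch && !PySem.Chars.isalpha ch),
       c + l.countP (fun ch => !PySem.Chars.isalpha ch && !PySem.Chars.isdigit ch)) := by
  induction l generalizing a b c with
  | nil => simp
  | cons x xs ih =>
    simp only [List.foldl_cons, List.countP_cons]
    by_cases hx : PySem.Chars.isalpha x = true <;>
      by_cases hy : PySem.Chars.isdigit x = true <;>
      simp [hx, hy, ih] <;> ring_nf

-- By exclusivity, A's elif branch counts exactly the digits.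
theorem countP_digit_not_alpha (l : List Char) :
    l.countP (fun ch => PySem.Chars.isdigit ch && !PySem.Chars.isalpha ch)
      = l.countP (fun ch => PySem.Chars.isdigit ch) := by
  apply List.countP_congr
  intro x _
  by_cases hx : PySem.Chars.isalpha x = true
  · simp [hx, alpha_digit_excl x hx]
  · simp [hx]

-- The three branch counts partition the string's length.
theorem count_partition (l : List Char) :
    l.countP (fun ch => PySem.Chars.isalpha ch)
      + l.countP (fun ch => PySem.Chars.isdigit ch && !PySem.Chars.isalpha ch)
      + l.countP (fun ch => !PySem.Chars.isalpha ch && !PySem.Chars.isdigit ch)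
      = l.length := by
  induction l with
  | nil => simp
  | cons x xs ih =>
    simp only [List.countP_cons, List.length_cons]
    by_cases hx : PySem.Chars.isalpha x = true <;>
      by_cases hy : PySem.Chars.isdigit x = true <;>
      simp [hx, hy] <;> omega

-- ===== VERDICT (by name: the statement is the Claim_ definition above) =====
theorem count_spec : Claim_equal_count := by
  intro s _
  unfold Spec_count count count_alt
  rw [count_loop]
  have h1 := countP_digit_not_alpha s.toList
  have h2 := count_partition s.toList
  have h3 : s.toList.length = s.length := by simp
  refine Prod.ext ?_ (Prod.ext ?_ ?_) <;> simp <;> omega
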